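-- pv_equiv track=rewrite | github.com/saidatta/Project-euler | lib/Problems_101_200/p111.py | insert_digit
-- ===== SOURCE A (Python) =====
-- def insert_digit(seed, numDigits):
--     for i in range(0, len(seed) + 1):
--         for digit in range(0, 10):
--             temp = seed[:i] + str(digit) + seed[i:]
--             if numDigits == 1:
--                 yield temp
--             else:
--                 yield from insert_digit(temp, numDigits - 1)
-- ===== SOURCE B (Python) =====
-- def insert_digit(seed, numDigits):
--     # Iterative level-by-level expansion instead of recursion; concatenating the
--     # expansions level by level reproduces the recursive DFS order exactly.
--     # (A recurses without end when numDigits < 1; we reject the argument instead.)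
--     if numDigits < 1:
--         raise ValueError("numDigits must be >= 1")
--     results = [seed]
--     for _ in range(numDigits):
--         results = [s[:i] + str(d) + s[i:]
--                    for s in results
--                    for i in range(len(s) + 1)
--                    for d in range(10)]
--     yield from results
-- ===== Notes on version B (the rewrite author's own statement) =====
-- stated objective: alternative
-- what changed: Replaces the depth-first recursion with an iterative level-by-level expansion: keep a worklist starting at [seed] and, counting numDigits down, rewrite it with a single comprehension inserting every digit at every position; concatenating the expansions level by level reproduces the DFS order exactly.
import Mathlib
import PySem

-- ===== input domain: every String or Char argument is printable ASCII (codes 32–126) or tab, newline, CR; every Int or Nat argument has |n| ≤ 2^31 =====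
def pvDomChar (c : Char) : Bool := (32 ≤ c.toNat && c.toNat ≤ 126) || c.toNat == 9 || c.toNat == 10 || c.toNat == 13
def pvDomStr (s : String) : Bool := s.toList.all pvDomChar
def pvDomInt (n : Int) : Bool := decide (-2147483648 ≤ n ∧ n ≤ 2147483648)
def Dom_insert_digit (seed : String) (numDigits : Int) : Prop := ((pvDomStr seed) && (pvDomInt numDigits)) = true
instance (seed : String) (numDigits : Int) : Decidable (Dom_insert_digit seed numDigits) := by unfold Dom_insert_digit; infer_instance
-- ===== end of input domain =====

-- B replaces A's depth-first recursion by an iterative level-by-level expansion of a worklist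
-- (same output list, same order); equivalence is proved for numDigits ≥ 1 (A raises RecursionError otherwise).

-- ===== PORT A =====
-- A recurses with numDigits-1 until numDigits == 1; the recursion depth is numDigits, so the
-- Nat fuel numDigits.toNat is exact on Pre_ (numDigits ≥ 1). Slices seed[:i]/seed[i:] with
-- 0 ≤ i ≤ len are exactly take/drop; str(digit) is PySem.Int.toStr.
def insAuxA : List Char → Nat → List String
  | _, 0 => []  -- unreachable under Pre_ (A raises RecursionError for numDigits ≤ 0)
  | seed, Nat.succ m =>
    (List.range (seed.length + 1)).foldl (fun acc i =>
      (List.range 10).foldl (fun acc2 d =>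
        let temp := seed.take i ++ (PySem.Int.toStr (Int.ofNat d)).toList ++ seed.drop i
        if m = 0 then acc2 ++ [String.ofList temp] else acc2 ++ insAuxA temp m) acc) []

def insert_digit (seed : String) (numDigits : Int) : List String :=
  insAuxA seed.toList numDigits.toNat

-- ===== PORT B =====
-- one expansion step: the inner comprehension '[s[:i]+str(d)+s[i:] for s in results for i .. for d ..]'
def stepB (cur : List String) : List String :=
  cur.flatMap (fun s =>
    (List.range (s.toList.length + 1)).flatMap (fun i =>
      (List.range 10).map (fun d =>
        String.ofList (s.toList.take i ++ (PySem.Int.toStr (Int.ofNat d)).toList ++ s.toList.drop i))))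

-- the 'raise ValueError' branch has no value; [] stands in for it (outside Pre_, B raises there)
def insert_digit_alt (seed : String) (numDigits : Int) : List String :=
  if numDigits < 1 then []
  else (List.range numDigits.toNat).foldl (fun cur _ => stepB cur) [seed]

-- ===== PRECONDITION & SPEC =====
-- A raises RecursionError (infinite recursion) whenever numDigits ≤ 0; those inputs are excluded.
def Pre_insert_digit (_seed : String) (numDigits : Int) : Prop := 0 < numDigits
instance (seed : String) (numDigits : Int) : Decidable (Pre_insert_digit seed numDigits) := by unfold Pre_insert_digit; infer_instance
def pvWitness_insert_digit : String × Int := ("7", 1)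

def Spec_insert_digit (seed : String) (numDigits : Int) (out : List String) : Prop := out = insert_digit_alt seed numDigits
instance (seed : String) (numDigits : Int) (out : List String) : Decidable (Spec_insert_digit seed numDigits out) := by unfold Spec_insert_digit; infer_instance

-- ===== CLAIM (what is proved, stated in full; the proofs are below) =====
def Claim_equal_insert_digit : Prop := ∀ (seed : String) (numDigits : Int), Dom_insert_digit seed numDigits → Pre_insert_digit seed numDigits → Spec_insert_digit seed numDigits (insert_digit seed numDigits)

-- ===== LEMMAS AND PROOFS =====

-- one level of B-expansion of a single string, over its character list
def expandL (s : List Char) : List String :=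
  (List.range (s.length + 1)).flatMap (fun i =>
    (List.range 10).map (fun d =>
      String.ofList (s.take i ++ (PySem.Int.toStr (Int.ofNat d)).toList ++ s.drop i)))

theorem stepB_eq_flatMap (cur : List String) :
    stepB cur = cur.flatMap (fun s => expandL s.toList) := rfl

-- 'apply stepB, then iterate n more times' (inner-first), matching the DFS recursion's shape
def loopB : Nat → List String → List String
  | 0, xs => xs
  | Nat.succ n, xs => loopB n (stepB xs)

theorem loopB_stepB_comm (n : Nat) : ∀ xs, loopB n (stepB xs) = stepB (loopB n xs) := by
  induction n with
  | zero => intro xs; rfl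
  | succ n ih => intro xs; simp only [loopB]; rw [ih]

theorem foldl_range_eq_loopB (k : Nat) (xs : List String) :
    (List.range k).foldl (fun cur _ => stepB cur) xs = loopB k xs := by
  induction k generalizing xs with
  | zero => rfl
  | succ k ih =>
    rw [List.range_succ, List.foldl_append, ih]
    simp only [List.foldl]
    rw [loopB, loopB_stepB_comm]

theorem loopB_flatMap (n : Nat) : ∀ {α : Type} (xs : List α) (g : α → List String),
    loopB n (xs.flatMap g) = xs.flatMap (fun x => loopB n (g x)) := by
  induction n with
  | zero => intro α xs g; rfl
  | succ n ih =>
    intro α xs g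
    simp only [loopB, stepB_eq_flatMap, List.flatMap_assoc]
    exact ih xs _

-- A's nested accumulating foldls are the flatMap over (i, d) of the per-child contribution
theorem flatMap_singleton_eq_map {a b : Type} (l : List a) (f : a → b) :
    l.flatMap (fun x => [f x]) = l.map f := by
  induction l with
  | nil => rfl
  | cons x l ih => simp [List.flatMap_cons, ih]

theorem insAuxA_succ (seed : List Char) (m : Nat) :
    insAuxA seed (m + 1) =
      (List.range (seed.length + 1)).flatMap (fun i =>
        (List.range 10).flatMap (fun d =>
          let temp := seed.take i ++ (PySem.Int.toStr (Int.ofNat d)).toList ++ seed.drop i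
          if m = 0 then [String.ofList temp] else insAuxA temp m)) := by
  show (List.range (seed.length + 1)).foldl _ [] = _
  have inner : ∀ (i : Nat) (acc : List String),
      (List.range 10).foldl (fun acc2 d =>
        let temp := seed.take i ++ (PySem.Int.toStr (Int.ofNat d)).toList ++ seed.drop i
        if m = 0 then acc2 ++ [String.ofList temp] else acc2 ++ insAuxA temp m) acc
      = acc ++ (List.range 10).flatMap (fun d =>
          let temp := seed.take i ++ (PySem.Int.toStr (Int.ofNat d)).toList ++ seed.drop i
          if m = 0 then [String.ofList temp] else insAuxA temp m) := by
    intro i acc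
    by_cases hm : m = 0 <;>
      simp only [hm, if_true, if_false] <;>
      exact PySem.List.foldl_append_eq_flatMap _ _ _
  have hcong := PySem.List.foldl_congr_mem
    (List.range (seed.length + 1)) _
    (fun acc i =>
      acc ++ (List.range 10).flatMap (fun d =>
        let temp := seed.take i ++ (PySem.Int.toStr (Int.ofNat d)).toList ++ seed.drop i
        if m = 0 then [String.ofList temp] else insAuxA temp m)) []
    (fun acc i _ => inner i acc)
  rw [hcong, PySem.List.foldl_append_eq_flatMap]
  rfl

theorem toList_mk (l : List Char) : (String.ofList l).toList = l := String.toList_ofList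

-- main invariant: A's recursion with fuel n+1 equals n+1 iterations of B's expansion step
theorem insAuxA_eq_loopB (n : Nat) : ∀ (s : List Char),
    insAuxA s (n + 1) = loopB (n + 1) [String.ofList s] := by
  induction n with
  | zero =>
    intro s
    rw [insAuxA_succ]
    show _ = stepB [String.ofList s]
    simp only [stepB_eq_flatMap, List.flatMap_cons, List.flatMap_nil, List.append_nil,
      toList_mk, expandL]
    exact List.flatMap_congr (fun i _ => flatMap_singleton_eq_map _ _)
  | succ n ih =>
    intro s
    rw [insAuxA_succ]
    simp only [Nat.succ_ne_zero, if_false]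
    have h1 : (List.range (s.length + 1)).flatMap (fun i =>
        (List.range 10).flatMap (fun d =>
          insAuxA (s.take i ++ (PySem.Int.toStr (Int.ofNat d)).toList ++ s.drop i) n.succ))
        = (expandL s).flatMap (fun t => insAuxA t.toList n.succ) := by
      simp only [expandL, List.flatMap_assoc, List.flatMap_map, toList_mk]
    rw [h1]
    have h2 : (expandL s).flatMap (fun t => insAuxA t.toList n.succ)
        = (expandL s).flatMap (fun t => loopB n.succ [t]) := by
      apply List.flatMap_congr
      intro t _
      have := ih t.toList
      rwa [String.ofList_toList] at this
    rw [h2, ← loopB_flatMap]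
    have h3 : (expandL s).flatMap (fun t => [t]) = expandL s := by simp
    rw [h3]
    show loopB n.succ (expandL s) = loopB n.succ (stepB [String.ofList s])
    congr 1
    simp [stepB_eq_flatMap]

-- ===== VERDICT (by name: the statement is the Claim_ definition above) =====
theorem insert_digit_spec : Claim_equal_insert_digit := by
  intro seed numDigits _ hpre
  show insert_digit seed numDigits = insert_digit_alt seed numDigits
  unfold insert_digit insert_digit_alt
  rw [if_neg (by have h0 : 0 < numDigits := hpre; omega : ¬ numDigits < 1), foldl_range_eq_loopB]
  obtain ⟨k, hk⟩ : ∃ k, numDigits.toNat = k + 1 := by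
    refine ⟨numDigits.toNat - 1, ?_⟩
    have : 0 < numDigits := hpre
    omega
  rw [hk, insAuxA_eq_loopB]
  congr 1
  exact congrArg (fun l => [l]) String.ofList_toList
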